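-- pv_equiv track=rewrite | github.com/Plasmoxy/MaturitaInformatika2019 | python/strukturovane_typy/uloha_hranie_znaky.py | pomiesany_retazec
-- ===== SOURCE A (Python) =====
-- def pomiesany_retazec(a, b):
--     out = ""
--
--     # nech a je kratsi retazec!
--     if len(a) > len(b):
--         a, b = b, a
--
--     for i in range(0, len(b)):
--         out += a[i] if i < len(a) else ""
--         out += b[i]
--
--     return out
-- ===== SOURCE B (Python) =====
-- def pomiesany_retazec(a, b):
--     # keep the swap so a is the shorter string
--     if len(a) > len(b):
--         a, b = b, a
--     head = ''.join(x + y for x, y in zip(a, b))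
--     tail = b[len(a):]
--     return head + tail
-- ===== Notes on version B (the rewrite author's own statement) =====
-- stated objective: idiomatic
-- what changed: A's single loop over range(len(b)) with a per-iteration 'i < len(a)' guard is replaced by two passes: zip(a,b)+join builds the interleaved common prefix, and one slice b[len(a):] appends the leftover.
import Mathlib
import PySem

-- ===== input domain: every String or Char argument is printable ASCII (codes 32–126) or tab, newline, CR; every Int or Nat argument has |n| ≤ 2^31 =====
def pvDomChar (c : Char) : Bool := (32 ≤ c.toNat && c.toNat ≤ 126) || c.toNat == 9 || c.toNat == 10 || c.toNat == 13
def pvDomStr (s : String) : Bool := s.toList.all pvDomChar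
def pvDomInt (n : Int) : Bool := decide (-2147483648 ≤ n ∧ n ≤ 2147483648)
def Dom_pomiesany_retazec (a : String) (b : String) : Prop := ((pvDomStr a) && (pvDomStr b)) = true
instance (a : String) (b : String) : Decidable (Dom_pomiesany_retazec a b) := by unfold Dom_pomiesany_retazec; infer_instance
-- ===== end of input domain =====

-- B replaces A's single guarded loop by a zip over the common prefix plus one slice for the leftover (idiomatic; same cost).

-- ===== PORT A =====
-- literal port: swap so a is shorter, then one loop over range(len(b)) appending the guarded a[i] and b[i]
def pomiesany_retazec (a : String) (b : String) : String :=
  let x := if a.toList.length > b.toList.length then (b.toList, a.toList) else (a.toList, b.toList)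
  let la := x.1
  let lb := x.2
  String.ofList ((PySem.List.pyRange 0 (lb.length : Int) 1).foldl
    (fun out i =>
      (out ++ (if i < (la.length : Int) then [PySem.List.pyGetD la i ' '] else []))
        ++ [PySem.List.pyGetD lb i ' ']) [])

-- ===== PORT B =====
-- literal port of Source B: swap, head = join of zipped pairs, tail = b[len(a):]
def pomiesany_retazec_alt (a : String) (b : String) : String :=
  let x := if a.toList.length > b.toList.length then (b.toList, a.toList) else (a.toList, b.toList)
  let la := x.1
  let lb := x.2
  let head := (la.zip lb).flatMap (fun p => [p.1, p.2])
  let tail := PySem.List.slice lb (some (la.length : Int)) none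
  String.ofList (head ++ tail)

-- ===== PRECONDITION & SPEC =====
def Spec_pomiesany_retazec (a : String) (b : String) (out : String) : Prop := out = pomiesany_retazec_alt a b
instance (a : String) (b : String) (out : String) : Decidable (Spec_pomiesany_retazec a b out) := by unfold Spec_pomiesany_retazec; infer_instance

-- ===== CLAIM (what is proved, stated in full; the proofs are below) =====
def Claim_equal_pomiesany_retazec : Prop := ∀ (a : String) (b : String), Dom_pomiesany_retazec a b → Spec_pomiesany_retazec a b (pomiesany_retazec a b)

-- ===== LEMMAS AND PROOFS =====

-- the loop over range(len(b)) produces the interleaving of the common prefix followed by the leftover of b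
lemma flat_interleave : ∀ (lb la : List Char), la.length ≤ lb.length →
    (List.range lb.length).flatMap
      (fun k => (if k < la.length then [la.getD k ' '] else []) ++ [lb.getD k ' '])
      = (la.zip lb).flatMap (fun p => [p.1, p.2]) ++ lb.drop la.length := by
  intro lb
  induction lb with
  | nil =>
    intro la h
    simp at h
    simp [h]
  | cons y t ih =>
    intro la h
    simp only [List.length_cons]
    rw [List.range_succ_eq_map, List.flatMap_cons, List.flatMap_map]
    cases la with
    | nil =>
      simpa using ih [] (Nat.zero_le _)
    | cons c s =>
      have hs : s.length ≤ t.length := by simpa using h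
      simpa [Nat.succ_lt_succ_iff] using ih s hs

-- ===== VERDICT =====
theorem pomiesany_retazec_spec : Claim_equal_pomiesany_retazec := by
  intro a b _
  unfold Spec_pomiesany_retazec pomiesany_retazec pomiesany_retazec_alt
  by_cases hgt : a.toList.length > b.toList.length
  · have hle : b.toList.length ≤ a.toList.length := by omega
    simp only [if_pos hgt]
    simp only [List.append_assoc, PySem.List.foldl_append_eq_flatMap, List.nil_append,
      PySem.List.pyRange_zero_nat, List.flatMap_map, PySem.List.pyGetD_natCast,
      Nat.cast_lt, PySem.List.slice_from_natCast]
    rw [flat_interleave _ _ hle]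
  · have hle : a.toList.length ≤ b.toList.length := by omega
    simp only [if_neg hgt]
    simp only [List.append_assoc, PySem.List.foldl_append_eq_flatMap, List.nil_append,
      PySem.List.pyRange_zero_nat, List.flatMap_map, PySem.List.pyGetD_natCast,
      Nat.cast_lt, PySem.List.slice_from_natCast]
    rw [flat_interleave _ _ hle]
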